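-- pv_equiv track=rewrite | github.com/Harryts1/II3160 | src/main.py | extract_menu_items
-- ===== SOURCE A (Python) =====
-- def extract_menu_items(menu_lines: list) -> list:
--     """Extract menu items with improved formatting."""
--     menu_items = []
--     current_item = None
--
--     for line in menu_lines:
--         if any(meal in line.lower() for meal in ['breakfast:', 'lunch:', 'dinner:']):
--             if current_item:
--                 menu_items.append(current_item)
--
--             meal_name = line.split(':')[0].strip()
--             desc = line.split(':')[1].strip() if ':' in line else ''
--
--             current_item = {
--                 "name": f"{meal_name}: {desc}",
--                 "calories": "400 calories",
--                 "description": "Balanced meal with essential nutrients"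
--             }
--         elif current_item and line:
--             current_item['description'] = line.strip()
--
--     if current_item:
--         menu_items.append(current_item)
--
--     return menu_items if menu_items else create_default_menu_items()
--
-- def create_default_menu_items() -> list:
--     """Create default catering menu items."""
--     return [
--         {
--             "name": "Breakfast: Wholesome Morning Bowl",
--             "calories": "400 calories",
--             "description": "A nutritious breakfast option with whole grains and fresh fruits"
--         },
--         {
--             "name": "Lunch: Garden Fresh Plate",
--             "calories": "500 calories",
--             "description": "A balanced mix of vegetables and plant-based proteins"
--         },
--         {
--             "name": "Dinner: Evening Wellness Meal",
--             "calories": "450 calories",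
--             "description": "Light and nutritious dinner option"
--         }
--     ]
-- ===== SOURCE B (Python) =====
-- def create_default_menu_items() -> list:
--     """Create default catering menu items."""
--     return [
--         {
--             "name": "Breakfast: Wholesome Morning Bowl",
--             "calories": "400 calories",
--             "description": "A nutritious breakfast option with whole grains and fresh fruits"
--         },
--         {
--             "name": "Lunch: Garden Fresh Plate",
--             "calories": "500 calories",
--             "description": "A balanced mix of vegetables and plant-based proteins"
--         },
--         {
--             "name": "Dinner: Evening Wellness Meal",
--             "calories": "450 calories",
--             "description": "Light and nutritious dinner option"
--         }
--     ]
--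
-- def _is_header(line: str) -> bool:
--     return any(meal in line.lower() for meal in ('breakfast:', 'lunch:', 'dinner:'))
--
-- def extract_menu_items(menu_lines: list) -> list:
--     """Extract menu items with improved formatting."""
--     n = len(menu_lines)
--     # skip everything before the first header line
--     i = 0
--     while i < n and not _is_header(menu_lines[i]):
--         i += 1
--     if i == n:
--         return create_default_menu_items()
--     # one item per header-led segment (header, then body up to the next header)
--     items = []
--     while i < n:
--         header = menu_lines[i]
--         i += 1
--         body = []
--         while i < n and not _is_header(menu_lines[i]):
--             body.append(menu_lines[i])
--             i += 1
--         stripped = [ln.strip() for ln in body if ln]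
--         desc = stripped[-1] if stripped else 'Balanced meal with essential nutrients'
--         name = header.split(':')[0].strip() + ': ' + \
--             (header.split(':')[1].strip() if ':' in header else '')
--         items.append({'name': name, 'calories': '400 calories', 'description': desc})
--     return items
-- ===== Notes on version B (the rewrite author's own statement) =====
-- stated objective: alternative
-- what changed: Replaces A's single stateful pass with a mutable current_item accumulator by a cursor-based partition of the lines into header-led segments: skip the prefix before the first header, then per segment collect the body up to the next header and build the item from it (description = last non-empty body line), keeping the default-menu fallback when no header exists.
import Mathlib
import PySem

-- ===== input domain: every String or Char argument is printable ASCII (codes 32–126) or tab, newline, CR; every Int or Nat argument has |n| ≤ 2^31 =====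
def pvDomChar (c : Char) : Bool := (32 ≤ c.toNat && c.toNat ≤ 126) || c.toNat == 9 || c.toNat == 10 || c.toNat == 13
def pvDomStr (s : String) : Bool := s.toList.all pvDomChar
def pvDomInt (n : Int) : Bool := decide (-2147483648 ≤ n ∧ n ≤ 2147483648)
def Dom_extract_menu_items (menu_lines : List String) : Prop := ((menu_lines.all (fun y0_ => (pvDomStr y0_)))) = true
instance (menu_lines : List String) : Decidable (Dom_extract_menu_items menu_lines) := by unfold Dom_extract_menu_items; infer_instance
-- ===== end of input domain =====

-- B re-implements A's stateful single pass as a recursive partition into header-led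
-- segments (objective: alternative decomposition, same cost); proved equal on all inputs.

-- helpers shared by both ports (data / the same Python subexpressions):
-- any(meal in line.lower() for meal in ['breakfast:', 'lunch:', 'dinner:'])
def pvIsHeader (line : String) : Bool :=
  (["breakfast:", "lunch:", "dinner:"]).any (fun meal => PySem.Str.isIn meal (PySem.Str.lower line))

-- f"{line.split(':')[0].strip()}: {line.split(':')[1].strip() if ':' in line else ''}"
-- (index 0 is always in range: split(':') returns a non-empty list, so .getD "" never fires;
--  index 1 is guarded by ':' in line exactly as in the Python)
def pvHeaderName (line : String) : String :=
  PySem.Str.strip ((PySem.List.pyGet? ((PySem.Str.split? line ":").getD []) 0).getD "") ++ ": " ++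
    (if PySem.Str.isIn ":" line then
      PySem.Str.strip ((PySem.List.pyGet? ((PySem.Str.split? line ":").getD []) 1).getD "")
    else "")

-- create_default_menu_items()
def pvDefaults : List (List (String × String)) :=
  [[("name", "Breakfast: Wholesome Morning Bowl"), ("calories", "400 calories"),
    ("description", "A nutritious breakfast option with whole grains and fresh fruits")],
   [("name", "Lunch: Garden Fresh Plate"), ("calories", "500 calories"),
    ("description", "A balanced mix of vegetables and plant-based proteins")],
   [("name", "Dinner: Evening Wellness Meal"), ("calories", "450 calories"),
    ("description", "Light and nutritious dinner option")]]

-- ===== PORT A =====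
-- the for-loop over menu_lines with state (menu_items, current_item), plus the
-- final 'if current_item: menu_items.append(current_item)'
def pvLoopA : List String → List (PySem.Dict String String) →
    Option (PySem.Dict String String) → List (PySem.Dict String String)
  | [], menu_items, cur =>
    match cur with
    | some c => menu_items ++ [c]
    | none => menu_items
  | line :: rest, menu_items, cur =>
    if pvIsHeader line then
      let menu_items' := match cur with
        | some c => menu_items ++ [c]
        | none => menu_items
      pvLoopA rest menu_items'
        (some (PySem.Dict.mk [("name", pvHeaderName line), ("calories", "400 calories"),
          ("description", "Balanced meal with essential nutrients")]))
    else
      match cur with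
      | some c =>
        if line ≠ "" then
          pvLoopA rest menu_items (some (c.insert "description" (PySem.Str.strip line)))
        else pvLoopA rest menu_items (some c)
      | none => pvLoopA rest menu_items none

def extract_menu_items (menu_lines : List String) : List (List (String × String)) :=
  let menu_items := pvLoopA menu_lines [] none
  if menu_items.isEmpty then pvDefaults else menu_items.map PySem.Dict.items

-- ===== PORT B =====
-- _span_body: split lines into (body, rest) where rest starts at the first header
def pvSpanBody : List String → List String × List String
  | [] => ([], [])
  | line :: rest =>
    if pvIsHeader line then ([], line :: rest)
    else
      let (body, r) := pvSpanBody rest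
      (line :: body, r)

-- termination measure for pvBuild (the remaining segment is a suffix)
theorem pvSpanBody_snd_length_le (l : List String) : (pvSpanBody l).2.length ≤ l.length := by
  induction l with
  | nil => simp [pvSpanBody]
  | cons a t ih =>
    simp only [pvSpanBody]
    split
    · simp
    · simpa using Nat.le_succ_of_le ih

-- _build(header, rest)
def pvBuild (header : String) (rest : List String) : List (List (String × String)) :=
  let body := (pvSpanBody rest).1
  let rest2 := (pvSpanBody rest).2
  let stripped := (body.filter (fun ln => ln ≠ "")).map PySem.Str.strip
  let desc := stripped.getLastD "Balanced meal with essential nutrients"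
  let item : List (String × String) :=
    [("name", pvHeaderName header), ("calories", "400 calories"), ("description", desc)]
  match h : rest2 with
  | [] => [item]
  | h2 :: t => item :: pvBuild h2 t
termination_by rest.length
decreasing_by
  have h1 := pvSpanBody_snd_length_le rest
  have h2 : (pvSpanBody rest).2 = h2 :: t := h
  rw [h2] at h1
  simp only [List.length_cons] at h1
  omega

def extract_menu_items_alt (menu_lines : List String) : List (List (String × String)) :=
  match (pvSpanBody menu_lines).2 with
  | [] => pvDefaults
  | h :: t => pvBuild h t

-- ===== PRECONDITION & SPEC =====
def Spec_extract_menu_items (menu_lines : List String) (out : List (List (String × String))) : Prop := out = extract_menu_items_alt menu_lines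
instance (menu_lines : List String) (out : List (List (String × String))) : Decidable (Spec_extract_menu_items menu_lines out) := by unfold Spec_extract_menu_items; infer_instance

-- ===== CLAIM (what is proved, stated in full; the proofs are below) =====
def Claim_equal_extract_menu_items : Prop := ∀ (menu_lines : List String), Dom_extract_menu_items menu_lines → Spec_extract_menu_items menu_lines (extract_menu_items menu_lines)

-- ===== LEMMAS AND PROOFS =====

-- the shape of every dict A's loop carries
def pvMkD (n d : String) : PySem.Dict String String :=
  PySem.Dict.mk [("name", n), ("calories", "400 calories"), ("description", d)]

-- the finished item for name n, running description d, and body lines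
def pvFin (n d : String) (body : List String) : List (String × String) :=
  [("name", n), ("calories", "400 calories"),
   ("description", ((body.filter (fun ln => ln ≠ "")).map PySem.Str.strip).getLastD d)]

-- B's result on the suffix starting at a header (or nothing)
def pvTail : List String → List (List (String × String))
  | [] => []
  | h :: t => pvBuild h t

theorem pvInsert_desc (n d d' : String) :
    (pvMkD n d).insert "description" d' = pvMkD n d' := by
  apply PySem.Dict.ext
  simp [pvMkD, PySem.Dict.insert, PySem.Dict.contains]

theorem pvItems_mkD (n d : String) : (pvMkD n d).items = pvFin n d [] := rfl

theorem pvFin_cons_pos (n d line : String) (body : List String) (h : line ≠ "") :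
    pvFin n d (line :: body) = pvFin n (PySem.Str.strip line) body := by
  simp only [pvFin, List.filter_cons, ne_eq, h, not_false_eq_true, decide_true, if_true,
    List.map_cons, List.getLastD_cons]

theorem pvFin_cons_neg (n d : String) (body : List String) :
    pvFin n d ("" :: body) = pvFin n d body := by
  simp [pvFin]

theorem pvBuild_eq (header : String) (rest : List String) :
    pvBuild header rest =
      pvFin (pvHeaderName header) "Balanced meal with essential nutrients" (pvSpanBody rest).1
        :: pvTail (pvSpanBody rest).2 := by
  rw [pvBuild.eq_def]
  cases h : (pvSpanBody rest).2 with
  | nil => simp only [pvTail, pvFin]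
  | cons h2 t => simp only [pvTail, pvFin]

theorem pvTail_header (line : String) (rest : List String) (hh : pvIsHeader line = true) :
    pvTail ((pvSpanBody (line :: rest)).2) =
      pvFin (pvHeaderName line) "Balanced meal with essential nutrients" (pvSpanBody rest).1
        :: pvTail (pvSpanBody rest).2 := by
  simp only [pvSpanBody, hh, if_true]
  rw [show pvTail (line :: rest) = pvBuild line rest from rfl, pvBuild_eq]

theorem pvSpanBody_cons_neg (line : String) (rest : List String) (hh : ¬ pvIsHeader line = true) :
    pvSpanBody (line :: rest) = (line :: (pvSpanBody rest).1, (pvSpanBody rest).2) := by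
  simp [pvSpanBody, hh]

theorem pvLoopA_some (lines : List String) : ∀ (acc : List (PySem.Dict String String)) (n d : String),
    (pvLoopA lines acc (some (pvMkD n d))).map PySem.Dict.items =
      acc.map PySem.Dict.items ++ pvFin n d (pvSpanBody lines).1 :: pvTail (pvSpanBody lines).2 := by
  induction lines with
  | nil =>
    intro acc n d
    simp only [pvLoopA, pvSpanBody, pvTail, List.map_append, List.map_cons, List.map_nil,
      pvItems_mkD]
  | cons line rest ih =>
    intro acc n d
    by_cases hh : pvIsHeader line = true
    · simp only [pvLoopA, hh, if_true]
      rw [show (PySem.Dict.mk [("name", pvHeaderName line), ("calories", "400 calories"),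
            ("description", "Balanced meal with essential nutrients")]) =
          pvMkD (pvHeaderName line) "Balanced meal with essential nutrients" from rfl]
      rw [ih, pvTail_header line rest hh]
      simp only [pvSpanBody, hh, if_true, List.map_append, List.map_cons, List.map_nil,
        pvItems_mkD, List.append_assoc, List.singleton_append]
    · by_cases hl : line = ""
      · subst hl
        simp only [pvLoopA, hh, Bool.false_eq_true, if_false, ne_eq, not_true_eq_false,
          if_false]
        rw [ih, pvSpanBody_cons_neg _ _ hh]
        simp only [pvFin_cons_neg]
      · simp only [pvLoopA, hh, Bool.false_eq_true, if_false, ne_eq, hl, not_false_eq_true,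
          if_true]
        rw [pvInsert_desc, ih, pvSpanBody_cons_neg _ _ hh]
        simp only [pvFin_cons_pos n d line _ hl]

theorem pvLoopA_none (lines : List String) : ∀ (acc : List (PySem.Dict String String)),
    (pvLoopA lines acc none).map PySem.Dict.items =
      acc.map PySem.Dict.items ++ pvTail (pvSpanBody lines).2 := by
  induction lines with
  | nil => intro acc; simp [pvLoopA, pvSpanBody, pvTail]
  | cons line rest ih =>
    intro acc
    by_cases hh : pvIsHeader line = true
    · simp only [pvLoopA, hh, if_true]
      rw [show (PySem.Dict.mk [("name", pvHeaderName line), ("calories", "400 calories"),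
            ("description", "Balanced meal with essential nutrients")]) =
          pvMkD (pvHeaderName line) "Balanced meal with essential nutrients" from rfl]
      rw [pvLoopA_some, pvTail_header line rest hh]
    · simp only [pvLoopA, hh, Bool.false_eq_true, if_false]
      rw [ih, pvSpanBody_cons_neg _ _ hh]

-- ===== VERDICT (by name: the statement is the Claim_ definition above) =====
theorem extract_menu_items_spec : Claim_equal_extract_menu_items := by
  intro menu_lines _
  unfold Spec_extract_menu_items extract_menu_items extract_menu_items_alt
  have h := pvLoopA_none menu_lines []
  simp only [List.map_nil, List.nil_append] at h
  cases hs : (pvSpanBody menu_lines).2 with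
  | nil =>
    rw [hs] at h
    simp only [pvTail] at h
    have hz : pvLoopA menu_lines [] none = [] := by
      cases hc : pvLoopA menu_lines [] none with
      | nil => rfl
      | cons a t => rw [hc] at h; simp at h
    simp [hz]
  | cons hd tl =>
    rw [hs] at h
    simp only [pvTail] at h
    have hne : pvLoopA menu_lines [] none ≠ [] := by
      intro hc
      rw [hc] at h
      rw [pvBuild_eq] at h
      simp at h
    simp only [List.isEmpty_iff, hne, if_false, h]
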